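-- pv_equiv track=rewrite | github.com/DanielJMoser/Tutorium_Programmiertechnik | Uez5.py | is_interesting_number
-- ===== SOURCE A (Python) =====
-- def digit_power_sum(digits, power):
--     """
--     Berechnet die Summe der Ziffern in der Liste und potenziert das Ergebnis mit 'power'.
--     """
--     return sum(digits) ** power
--
-- def is_interesting_number(n):
--     """
--     Überprüft, ob eine Zahl 'interessant' ist, d.h. ob sie gleich der Ziffernsumme potenziert mit einer natürlichen Zahl ist.
--     """
--     digits = get_digits(n)
--     digit_sum = sum(digits)
--     if digit_sum == 1:
--         return False  # Ignoriere Zahlen mit einer Ziffernsumme von 1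
--
--     for power in range(1, 21):  # Begrenze die Überprüfung auf realistische Exponenten
--         if digit_power_sum(digits, power) == n:
--             return True
--         if digit_power_sum(digits, power) > n:
--             break  # Kein weiterer Test notwendig, wenn die Potenzsumme größer als n ist
--
--     return False
--
-- def get_digits(n):
--     """Zerlegt eine Zahl in ihre Ziffern."""
--     digits = []
--     while n > 0:
--         digits.append(n % 10)
--         n = n // 10
--     return digits
-- ===== SOURCE B (Python) =====
-- def _digit_sum(n):
--     return 0 if n <= 0 else n % 10 + _digit_sum(n // 10)
--
-- def is_interesting_number(n):
--     s = _digit_sum(n)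
--     if s == 0:
--         return n == 0
--     if s == 1:
--         return False
--     x, k = n, 0
--     while x > 1 and x % s == 0:
--         x //= s
--         k += 1
--     return x == 1 and 1 <= k <= 20
-- ===== Notes on version B (the rewrite author's own statement) =====
-- stated objective: alternative
-- what changed: Instead of building up powers s**k of the digit sum and comparing each against n, B repeatedly divides n down by the digit sum, counting divisions, and checks the quotient reaches 1 with a count in 1..20; the digit sum itself is computed by a direct recursion instead of materialising a digit list.
import Mathlib
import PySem

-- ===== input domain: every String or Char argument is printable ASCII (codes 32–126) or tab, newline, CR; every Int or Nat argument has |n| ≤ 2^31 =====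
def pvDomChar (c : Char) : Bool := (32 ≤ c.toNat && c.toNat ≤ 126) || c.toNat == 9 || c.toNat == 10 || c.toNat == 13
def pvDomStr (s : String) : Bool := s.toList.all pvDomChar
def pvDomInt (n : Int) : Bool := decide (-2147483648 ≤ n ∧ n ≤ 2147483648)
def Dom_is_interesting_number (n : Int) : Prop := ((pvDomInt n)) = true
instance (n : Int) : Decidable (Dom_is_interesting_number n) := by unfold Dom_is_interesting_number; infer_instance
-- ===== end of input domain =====

-- B replaces A's bounded build-up of digit-sum powers by a single divide-down pass:
-- it divides n by the digit sum while divisible, counting divisions (objective: alternative).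

-- termination helper for the ports' loops (n // b shrinks for 0 < n, 1 < b)
theorem pvFloordiv_shrinks (a b : Int) (ha : 0 < a) (hb : 1 < b) :
    0 ≤ PySem.Int.floordiv a b ∧ PySem.Int.floordiv a b < a := by
  rw [PySem.Int.floordiv_eq_ediv_of_pos (by omega)]
  constructor
  · exact Int.ediv_nonneg (by omega) (by omega)
  · rw [Int.ediv_lt_iff_lt_mul (by omega)]
    nlinarith

-- ===== PORT A =====
-- get_digits: while n > 0: collect n % 10, n //= 10
def getDigits (n : Int) : List Int :=
  if h : 0 < n then
    PySem.Int.mod n 10 :: getDigits (PySem.Int.floordiv n 10)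
  else []
termination_by n.toNat
decreasing_by
  have := pvFloordiv_shrinks n 10 h (by omega)
  omega

-- digit_power_sum: sum(digits) ** power; exact for power ≥ 0 (A only calls it with power in 1..20)
def digitPowerSum (digits : List Int) (power : Int) : Int :=
  digits.sum ^ power.toNat

-- the for-loop over range(1, 21) with its two-way exit
def powLoop (digits : List Int) (n : Int) : List Int → Bool
  | [] => false
  | p :: ps =>
      if digitPowerSum digits p = n then true
      else if digitPowerSum digits p > n then false
      else powLoop digits n ps

def is_interesting_number (n : Int) : Bool :=
  let digits := getDigits n
  let digitSum := digits.sum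
  if digitSum = 1 then false
  else powLoop digits n (PySem.List.pyRange 1 21 1)

-- ===== PORT B =====
def digitSumB (n : Int) : Int :=
  if h : n ≤ 0 then 0
  else PySem.Int.mod n 10 + digitSumB (PySem.Int.floordiv n 10)
termination_by n.toNat
decreasing_by
  have := pvFloordiv_shrinks n 10 (by omega) (by omega)
  omega

-- while x > 1 and x % s == 0: x //= s; k += 1
-- (the '2 ≤ s' conjunct is a totality guard only: both call sites have s ≥ 2)
def divLoop (s x k : Int) : Int × Int :=
  if h : 2 ≤ s ∧ 1 < x ∧ PySem.Int.mod x s = 0 then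
    divLoop s (PySem.Int.floordiv x s) (k + 1)
  else (x, k)
termination_by x.toNat
decreasing_by
  have := pvFloordiv_shrinks x s (by omega) (by omega)
  omega

def is_interesting_number_alt (n : Int) : Bool :=
  let s := digitSumB n
  if s = 0 then decide (n = 0)
  else if s = 1 then false
  else
    let r := divLoop s n 0
    decide (r.1 = 1) && (decide (1 ≤ r.2) && decide (r.2 ≤ 20))

-- ===== PRECONDITION & SPEC =====
def Spec_is_interesting_number (n : Int) (out : Bool) : Prop := out = is_interesting_number_alt n
instance (n : Int) (out : Bool) : Decidable (Spec_is_interesting_number n out) := by unfold Spec_is_interesting_number; infer_instance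

-- ===== CLAIM (what is proved, stated in full; the proofs are below) =====
def Claim_equal_is_interesting_number : Prop := ∀ (n : Int), Dom_is_interesting_number n → Spec_is_interesting_number n (is_interesting_number n)

-- ===== LEMMAS AND PROOFS =====

theorem sum_getDigits (n : Int) : (getDigits n).sum = digitSumB n := by
  fun_induction getDigits n with
  | case1 n h ih =>
      rw [digitSumB, dif_neg (by omega)]
      simp only [List.sum_cons, ih]
  | case2 n h =>
      rw [digitSumB, dif_pos (by omega)]
      simp

theorem digitSumB_pos (n : Int) (hn : 0 < n) : 1 ≤ digitSumB n := by
  fun_induction digitSumB n with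
  | case1 n h => omega
  | case2 n h ih =>
      have hm : PySem.Int.mod n 10 = n % 10 := PySem.Int.mod_eq_emod_of_pos (by omega)
      have hf : PySem.Int.floordiv n 10 = n / 10 := PySem.Int.floordiv_eq_ediv_of_pos (by omega)
      have hmr : 0 ≤ n % 10 := Int.emod_nonneg n (by omega)
      by_cases hq : PySem.Int.floordiv n 10 ≤ 0
      · rw [digitSumB, dif_pos hq]
        have hlt : n < 10 := by
          by_contra hge
          have : 1 ≤ n / 10 := (Int.le_ediv_iff_mul_le (by omega)).mpr (by omega)
          omega
        have : n % 10 = n := Int.emod_eq_of_lt (by omega) hlt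
        omega
      · have := ih (by omega)
        omega

theorem divLoop_count_le (s x k : Int) : k ≤ (divLoop s x k).2 := by
  fun_induction divLoop s x k with
  | case1 x k h ih => omega
  | case2 x k h => simp

theorem divLoop_pow (s : Int) (hs : 2 ≤ s) (j : Nat) :
    ∀ k : Int, divLoop s (s ^ j) k = (1, k + j) := by
  induction j with
  | zero => intro k; rw [divLoop]; simp
  | succ j ih =>
      intro k
      have hx : (1:Int) < s ^ (j+1) := one_lt_pow₀ (by omega) (by omega)
      have hmod : PySem.Int.mod (s ^ (j+1)) s = 0 :=
        (PySem.Int.mod_eq_zero_iff_dvd _ _).mpr (dvd_pow_self s (by omega))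
      have hdiv : PySem.Int.floordiv (s ^ (j+1)) s = s ^ j := by
        rw [PySem.Int.floordiv_eq_ediv_of_pos (by omega), pow_succ,
          Int.mul_ediv_cancel _ (by omega)]
      rw [divLoop, dif_pos ⟨hs, hx, hmod⟩, hdiv, ih (k + 1)]
      congr 1
      push_cast
      ring

theorem divLoop_inv (s x k : Int) (hs : 2 ≤ s) (hx : 0 < x) :
    (divLoop s x k).1 = 1 → x = s ^ ((divLoop s x k).2 - k).toNat := by
  fun_induction divLoop s x k with
  | case1 x k h ih =>
      intro h1
      obtain ⟨hs2, hx1, hmod⟩ := h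
      have hdvd : s ∣ x := (PySem.Int.mod_eq_zero_iff_dvd _ _).mp hmod
      have hfe : PySem.Int.floordiv x s = x / s := PySem.Int.floordiv_eq_ediv_of_pos (by omega)
      have hq : x = s * (x / s) := (Int.mul_ediv_cancel' hdvd).symm
      have hqpos : 0 < x / s := by
        by_contra hle
        push Not at hle
        nlinarith
      have hrec := ih (by rw [hfe]; omega) h1
      rw [hfe] at hrec
      have hk := divLoop_count_le s (PySem.Int.floordiv x s) (k + 1)
      rw [hfe] at hk
      set r := (divLoop s (x / s) (k + 1)).2 with hr
      have htn : (r - k).toNat = (r - (k + 1)).toNat + 1 := by omega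
      rw [hfe, htn, pow_succ, ← hrec, Int.ediv_mul_cancel hdvd]
  | case2 x k h =>
      intro h1
      simp at h1 ⊢
      omega

theorem powLoop_iff (digits : List Int) (n : Int) (hs : 2 ≤ digits.sum) :
    ∀ ps : List Int, ps.Pairwise (· ≤ ·) →
      (powLoop digits n ps = true ↔ ∃ p ∈ ps, digits.sum ^ p.toNat = n) := by
  intro ps
  induction ps with
  | nil => intro _; simp [powLoop]
  | cons p ps ih =>
      intro hpw
      have hpw' := List.pairwise_cons.mp hpw
      rw [powLoop]
      by_cases h1 : digitPowerSum digits p = n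
      · simp only [h1, if_true]
        exact iff_of_true trivial ⟨p, List.mem_cons_self, h1⟩
      · by_cases h2 : digitPowerSum digits p > n
        · simp only [h1, h2, if_true, if_false, Bool.false_eq_true, false_iff]
          rintro ⟨q, hq, hqe⟩
          rcases List.mem_cons.mp hq with rfl | hq'
          · exact h1 hqe
          · have hle : p ≤ q := hpw'.1 q hq'
            have hmono : digits.sum ^ p.toNat ≤ digits.sum ^ q.toNat :=
              pow_le_pow_right₀ (by omega) (by omega)
            unfold digitPowerSum at h1 h2
            omega
        · simp only [h1, h2, if_false]
          rw [ih hpw'.2]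
          constructor
          · rintro ⟨q, hq, hqe⟩
            exact ⟨q, List.mem_cons_of_mem _ hq, hqe⟩
          · rintro ⟨q, hq, hqe⟩
            rcases List.mem_cons.mp hq with rfl | hq'
            · exact absurd hqe h1
            · exact ⟨q, hq', hqe⟩

-- A = true ↔ ∃ j ∈ [1,20], s^j = n, in the s ≥ 2 case
theorem portA_iff (n : Int) (hs : 2 ≤ (getDigits n).sum) :
    (is_interesting_number n = true ↔
      ∃ j : Nat, 1 ≤ j ∧ j ≤ 20 ∧ (getDigits n).sum ^ j = n) := by
  unfold is_interesting_number
  simp only [if_neg (show ¬((getDigits n).sum = 1) by omega)]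
  rw [powLoop_iff (getDigits n) n hs _
    ((PySem.List.pairwise_lt_pyRange_one 1 21).imp (fun h => le_of_lt h))]
  constructor
  · rintro ⟨p, hp, hpe⟩
    rw [PySem.List.mem_pyRange_one] at hp
    exact ⟨p.toNat, by omega, by omega, hpe⟩
  · rintro ⟨j, hj1, hj2, hje⟩
    refine ⟨(j : Int), ?_, by simpa using hje⟩
    rw [PySem.List.mem_pyRange_one]
    omega

theorem portB_iff (n : Int) (hn : 0 < n) (hs : 2 ≤ digitSumB n) :
    (is_interesting_number_alt n = true ↔
      ∃ j : Nat, 1 ≤ j ∧ j ≤ 20 ∧ digitSumB n ^ j = n) := by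
  unfold is_interesting_number_alt
  simp only [if_neg (show ¬(digitSumB n = 0) by omega), if_neg (show ¬(digitSumB n = 1) by omega)]
  simp only [Bool.and_eq_true, decide_eq_true_eq]
  constructor
  · rintro ⟨h1, hk1, hk2⟩
    have hc := divLoop_count_le (digitSumB n) n 0
    have hinv := divLoop_inv (digitSumB n) n 0 hs hn h1
    refine ⟨((divLoop (digitSumB n) n 0).2).toNat, by omega, by omega, ?_⟩
    rw [show (((divLoop (digitSumB n) n 0).2).toNat) = ((divLoop (digitSumB n) n 0).2 - 0).toNat by omega]
    exact hinv.symm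
  · rintro ⟨j, hj1, hj2, hje⟩
    have hdl := divLoop_pow (digitSumB n) hs j 0
    rw [hje] at hdl
    rw [hdl]
    refine ⟨rfl, by simpa using (by omega : (1:Int) ≤ j), by simpa using (by omega : (j:Int) ≤ 20)⟩

theorem getDigits_nonpos (n : Int) (h : n ≤ 0) : getDigits n = [] := by
  rw [getDigits, dif_neg (by omega)]

theorem digitSumB_nonpos (n : Int) (h : n ≤ 0) : digitSumB n = 0 := by
  rw [digitSumB, dif_pos h]

theorem main_equiv (n : Int) : is_interesting_number n = is_interesting_number_alt n := by
  by_cases hn : n ≤ 0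
  · -- digits = [], s = 0; A's loop exits on its first iteration
    unfold is_interesting_number is_interesting_number_alt
    rw [getDigits_nonpos n hn, digitSumB_nonpos n hn]
    have hrange : PySem.List.pyRange 1 21 1 = 1 :: PySem.List.pyRange 2 21 1 := by
      have := PySem.List.pyRange_one_cons (a := 1) (b := 21) (by omega)
      simpa using this
    rw [hrange]
    unfold powLoop digitPowerSum
    by_cases h0 : n = 0
    · simp [h0]
    · simp [h0, show (0:Int) > n by omega, show ¬((0:Int) = n) by omega]
  · have hn' : 0 < n := by omega
    have hsum := sum_getDigits n
    have hpos := digitSumB_pos n hn'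
    by_cases hs1 : digitSumB n = 1
    · simp [is_interesting_number, is_interesting_number_alt, hsum, hs1]
    · have hs2 : 2 ≤ digitSumB n := by omega
      have hA := portA_iff n (by omega)
      have hB := portB_iff n hn' hs2
      rw [hsum] at hA
      rw [Bool.eq_iff_iff, hA, hB]

-- ===== VERDICT (by name: the statement is the Claim_ definition above) =====
theorem is_interesting_number_spec : Claim_equal_is_interesting_number := by
  intro n _
  unfold Spec_is_interesting_number
  exact main_equiv n
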